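-- pv_equiv track=rewrite | github.com/Srbuhi01/TheoryOfAlgorithms | Finitee.py | build_transition_table
-- ===== SOURCE A (Python) =====
-- def build_transition_table(pattern, alphabet):
--
--     m = len(pattern)
--     transition = [{} for _ in range(m + 1)]
--
--     for state in range(m + 1):
--         for char in alphabet:
--             next_state = state
--             while next_state > 0 and (next_state == m or pattern[next_state] != char):
--                 next_state -= 1
--             if next_state < m and pattern[next_state] == char:
--                 next_state += 1
--             transition[state][char] = next_state
--
--     return transition
-- ===== SOURCE B (Python) =====
-- def build_transition_table(pattern, alphabet):
--     m = len(pattern)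
--     last = {}          # last[c] = 1 + last index j (so far) with pattern[j] == c
--     table = []
--     for s in range(m + 1):
--         if s < m:
--             last[pattern[s]] = s + 1
--         table.append({c: last.get(c, 0) for c in alphabet})
--     return table
-- ===== Notes on version B (the rewrite author's own statement) =====
-- stated objective: faster
-- what changed: Instead of backing off state-by-state for every (state, char) pair, B keeps one running last-occurrence dictionary (char -> 1 + last index seen) updated in a single scan over the pattern, so each table entry is a constant-time lookup.
import Mathlib
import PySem

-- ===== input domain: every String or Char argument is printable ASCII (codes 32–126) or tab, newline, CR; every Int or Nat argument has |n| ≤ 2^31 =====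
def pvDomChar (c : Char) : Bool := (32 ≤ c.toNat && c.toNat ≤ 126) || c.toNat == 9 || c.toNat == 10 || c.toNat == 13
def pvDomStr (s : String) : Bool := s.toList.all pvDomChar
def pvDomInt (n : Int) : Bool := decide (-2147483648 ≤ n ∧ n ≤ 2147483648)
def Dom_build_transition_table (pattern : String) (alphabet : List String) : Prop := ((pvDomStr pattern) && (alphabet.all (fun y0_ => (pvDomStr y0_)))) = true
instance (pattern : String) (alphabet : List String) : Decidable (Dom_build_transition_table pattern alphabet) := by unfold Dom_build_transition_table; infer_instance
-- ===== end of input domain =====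

-- B replaces A's per-entry back-off scan by one running last-occurrence dictionary,
-- filling each entry with an O(1) lookup (objective: faster, asymptotic).

-- ===== PORT A =====
-- pattern[i] as a one-character Python string; both ports only use it with i in range.
def strAt (p : List Char) (i : Nat) : String :=
  match p[i]? with
  | some c => String.singleton c
  | none => ""

-- the 'while next_state > 0 and (next_state == m or pattern[next_state] != char)' loop
def pvBackoff (p : List Char) (m : Nat) (ch : String) : Nat → Nat
  | 0 => 0
  | n+1 => if (n+1 = m) ∨ (strAt p (n+1) ≠ ch) then pvBackoff p m ch n else n+1

-- body of the inner loop: the value stored in transition[state][char]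
def pvAEntry (p : List Char) (m : Nat) (ch : String) (state : Nat) : Nat :=
  let ns := pvBackoff p m ch state
  if ns < m ∧ strAt p ns = ch then ns + 1 else ns

def build_transition_table (pattern : String) (alphabet : List String) : List (List (String × Int)) :=
  (List.range (pattern.toList.length+1)).map (fun state =>
    (alphabet.foldl (fun (d : PySem.Dict String Int) ch =>
      d.insert ch (Int.ofNat (pvAEntry pattern.toList pattern.toList.length ch state))) PySem.Dict.empty).items)

-- ===== PORT B =====
-- {c: last.get(c, 0) for c in alphabet}
def pvRow (alphabet : List String) (last : PySem.Dict String Int) : List (String × Int) :=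
  (alphabet.foldl (fun (d : PySem.Dict String Int) ch =>
    d.insert ch (last.getD ch 0)) PySem.Dict.empty).items

-- the 'for s in range(m+1)' loop of Source B, with its running dict 'last'
def pvBGo (p : List Char) (m : Nat) (alphabet : List String)
    (last : PySem.Dict String Int) : Nat → Nat → List (List (String × Int))
  | _, 0 => []
  | s, k+1 =>
    let last' := if s < m then last.insert (strAt p s) (Int.ofNat (s+1)) else last
    pvRow alphabet last' :: pvBGo p m alphabet last' (s+1) k

def build_transition_table_alt (pattern : String) (alphabet : List String) : List (List (String × Int)) :=
  pvBGo pattern.toList pattern.toList.length alphabet PySem.Dict.empty 0 (pattern.toList.length+1)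

-- ===== PRECONDITION & SPEC =====
def Spec_build_transition_table (pattern : String) (alphabet : List String) (out : List (List (String × Int))) : Prop := out = build_transition_table_alt pattern alphabet
instance (pattern : String) (alphabet : List String) (out : List (List (String × Int))) : Decidable (Spec_build_transition_table pattern alphabet out) := by unfold Spec_build_transition_table; infer_instance

-- ===== CLAIM (what is proved, stated in full; the proofs are below) =====
def Claim_equal_build_transition_table : Prop := ∀ (pattern : String) (alphabet : List String), Dom_build_transition_table pattern alphabet → Spec_build_transition_table pattern alphabet (build_transition_table pattern alphabet)

-- ===== LEMMAS AND PROOFS =====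

-- common spec: pvL p ch s = 1 + the last index j < s with pattern[j] == ch (0 if none)
def pvL (p : List Char) (ch : String) : Nat → Nat
  | 0 => 0
  | j+1 => if strAt p j = ch then j+1 else pvL p ch j

theorem pvAEntry_eq_pvL (p : List Char) (m : Nat) (ch : String) :
    ∀ state, state ≤ m → pvAEntry p m ch state = pvL p ch (min (state+1) m) := by
  intro state
  induction state with
  | zero =>
    intro _
    by_cases hm : m = 0
    · subst hm; simp [pvAEntry, pvBackoff, pvL]
    · have h1 : min 1 m = 1 := by omega
      simp only [pvAEntry, pvBackoff, h1, pvL]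
      by_cases hc : strAt p 0 = ch
      · simp [hc]; omega
      · simp [hc]
  | succ n ih =>
    intro hle
    by_cases hcond : (n+1 = m) ∨ (strAt p (n+1) ≠ ch)
    · have hback : pvBackoff p m ch (n+1) = pvBackoff p m ch n := by
        simp [pvBackoff, hcond]
      have hA : pvAEntry p m ch (n+1) = pvAEntry p m ch n := by
        simp only [pvAEntry, hback]
      rw [hA, ih (by omega)]
      rcases hcond with hm | hc
      · have : min (n+1+1) m = m := by omega
        have h2 : min (n+1) m = m := by omega
        rw [this, h2]
      · by_cases hm2 : n + 1 = m
        · have h1 : min (n+1+1) m = m := by omega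
          have h2 : min (n+1) m = m := by omega
          rw [h1, h2]
        · have h1 : min (n+1+1) m = n+2 := by omega
          have h2 : min (n+1) m = n+1 := by omega
          rw [h1, h2]
          simp [pvL, hc]
    · push Not at hcond
      obtain ⟨hm, hc⟩ := hcond
      have hlt : n + 1 < m := by omega
      have hback : pvBackoff p m ch (n+1) = n+1 := by
        simp [pvBackoff, hm, hc]
      have : min (n+1+1) m = n+2 := by omega
      simp only [pvAEntry, hback, this]
      rw [if_pos ⟨hlt, hc⟩]
      simp [pvL, hc]

theorem pvRow_eq (p : List Char) (m : Nat) (alphabet : List String) (state : Nat)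
    (last : PySem.Dict String Int)
    (h : ∀ ch, last.getD ch 0 = Int.ofNat (pvAEntry p m ch state)) :
    pvRow alphabet last
      = (alphabet.foldl (fun (d : PySem.Dict String Int) ch =>
          d.insert ch (Int.ofNat (pvAEntry p m ch state))) PySem.Dict.empty).items := by
  unfold pvRow
  congr 2
  funext d ch
  rw [h ch]

theorem pvBGo_eq (p : List Char) (m : Nat) (alphabet : List String) :
    ∀ (k s : Nat) (last : PySem.Dict String Int), s + k = m + 1 →
      (∀ ch, last.getD ch 0 = Int.ofNat (pvL p ch (min s m))) →
      pvBGo p m alphabet last s k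
        = (List.range' s k).map (fun state =>
            (alphabet.foldl (fun (d : PySem.Dict String Int) ch =>
              d.insert ch (Int.ofNat (pvAEntry p m ch state))) PySem.Dict.empty).items) := by
  intro k
  induction k with
  | zero => intro s last _ _; simp [pvBGo]
  | succ n ih =>
    intro s last hk hinv
    have hs : s ≤ m := by omega
    have hstep : ∀ ch,
        (if s < m then last.insert (strAt p s) (Int.ofNat (s+1)) else last).getD ch 0
          = Int.ofNat (pvL p ch (min (s+1) m)) := by
      intro ch
      by_cases hsm : s < m
      · rw [if_pos hsm, PySem.Dict.getD_insert]
        have h1 : min (s+1) m = s + 1 := by omega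
        have h2 : min s m = s := by omega
        rw [h1]
        by_cases hc : strAt p s = ch
        · rw [if_pos hc.symm]; simp [pvL, hc]
        · rw [if_neg (fun he => hc he.symm), hinv ch, h2]
          simp [pvL, hc]
      · rw [if_neg hsm, hinv ch]
        have : min (s+1) m = min s m := by omega
        rw [this]
    simp only [pvBGo, List.range'_succ, List.map_cons]
    congr 1
    · apply pvRow_eq
      intro ch
      rw [hstep ch, pvAEntry_eq_pvL p m ch s hs]
    · exact ih (s+1) _ (by omega) hstep

-- ===== VERDICT (by name: the statement is the Claim_ definition above) =====
theorem build_transition_table_spec : Claim_equal_build_transition_table := by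
  intro pattern alphabet _
  unfold Spec_build_transition_table build_transition_table build_transition_table_alt
  rw [pvBGo_eq pattern.toList pattern.toList.length alphabet (pattern.toList.length + 1) 0
      PySem.Dict.empty (by omega)
      (by intro ch; simp [pvL, PySem.Dict.getD_eq_get?_getD, PySem.Dict.empty, PySem.Dict.get?])]
  rw [List.range_eq_range']
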